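-- pv_equiv track=rewrite | github.com/rpp0041/PCVN | Code/GroupFilesUtils.py | parse_table
-- ===== SOURCE A (Python) =====
-- def parse_table(rank_table, name_tab, num_of_categories):
--     # remove white spaces in fields
--     for i in range(0, len(rank_table)):
--         rank_table[i] = rank_table[i].lstrip()
--     """ when undefined appears in a row of the table percentile row  disappears, producing errors on code execution """
--     i = 0
--     while i < len(rank_table):
--         if rank_table[i] == 'undefined':
--             rank_table.insert(i + 1, '\\')
--         i += 1
--     """ difference of fields betwen actual 2017 (2018 data still not released)
--     and previus year (2016)"""
--     try:
--         diff = rank_table.index('2016') - 1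
--     except ValueError:
--         return None
--     """ num of standard fields for a normal rank table"""
--     num_fields = (num_of_categories * 3) + 1
--     """ num of fields to be remove"""
--     num_to_remove = diff - num_fields
--
--     if diff > num_fields:
--         # cont of fields to remove per row
--         cont = num_fields
--         # new tablef
--         table_parsed = list()
--         """ parse rank table"""
--         i = 0
--         while i < len(rank_table):
--             if cont == 0:  # cont is over
--                 i += num_to_remove  # skip extra fields
--                 cont = num_fields  # start again cont
--             else:
--                 table_parsed.append(rank_table[i])  # add field to new table
--                 cont -= 1
--             i += 1
--         rank_table = table_parsed.copy()
--         """ parse header table """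
--         num_header = (num_of_categories * 4) + 1
--         for j in range(num_header, len(name_tab)):
--             name_tab.pop()
--
--     return rank_table, name_tab
-- ===== SOURCE B (Python) =====
-- def parse_table(rank_table, name_tab, num_of_categories):
--     # strip fields in place, then expand 'undefined' rows once into a new list
--     rank_table[:] = [s.lstrip() for s in rank_table]
--     expanded = []
--     for s in rank_table:
--         expanded.append(s)
--         if s == 'undefined':
--             expanded.append('\\')
--     rank_table[:] = expanded
--     try:
--         diff = rank_table.index('2016') - 1
--     except ValueError:
--         return None
--     num_fields = (num_of_categories * 3) + 1
--     if diff > num_fields: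
--         # one block of num_fields kept fields every diff+1 entries
--         period = diff + 1
--         parsed = []
--         for start in range(0, len(rank_table), period):
--             parsed.extend(rank_table[start:start + num_fields])
--         rank_table = parsed
--         del name_tab[(num_of_categories * 4) + 1:]
--     return rank_table, name_tab
-- ===== Notes on version B (the rewrite author's own statement) =====
-- stated objective: simpler
-- what changed: The per-element counter/skip-jump while loop is replaced by slicing one block of num_fields kept fields per period (diff+1) over range(0,len,period); the in-place insert-while becomes a single expansion pass, and the pop loop becomes del name_tab[k:].
import Mathlib
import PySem

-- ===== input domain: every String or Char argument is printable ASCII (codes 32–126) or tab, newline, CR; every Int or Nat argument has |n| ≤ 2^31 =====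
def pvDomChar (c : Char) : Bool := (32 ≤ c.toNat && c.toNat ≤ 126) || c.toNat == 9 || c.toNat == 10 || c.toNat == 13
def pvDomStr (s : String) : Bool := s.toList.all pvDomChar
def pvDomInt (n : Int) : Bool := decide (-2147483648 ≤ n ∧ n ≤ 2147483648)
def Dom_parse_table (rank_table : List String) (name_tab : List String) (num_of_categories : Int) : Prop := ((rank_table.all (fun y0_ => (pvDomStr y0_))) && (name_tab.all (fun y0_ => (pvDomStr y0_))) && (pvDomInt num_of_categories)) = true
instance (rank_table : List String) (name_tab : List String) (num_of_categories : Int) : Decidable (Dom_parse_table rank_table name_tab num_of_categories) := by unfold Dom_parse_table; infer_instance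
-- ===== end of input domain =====

-- B replaces A's counter/skip-jump while loop by per-block slicing over range(0, len, period),
-- the insert-while by a single expansion pass, and the pop loop by del name_tab[k:] (simpler;
-- return-value equivalence: both Pythons also mutate their list arguments identically on Pre_).


-- ===== PORT A =====
-- A's insert-while: visiting each element; after 'undefined' the inserted '\' is the next
-- element visited (and is not 'undefined'), so the loop is this structural recursion.
def pvExpandA : List String → List String
  | [] => []
  | s :: rest => if s = "undefined" then s :: "\\" :: pvExpandA rest else s :: pvExpandA rest

-- A's parse while loop, state (i, cont, table_parsed); fuel = len(rank_table) bounds the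
-- iteration count since i increases by at least 1 per iteration (num_to_remove ≥ 1 at the call).
def pvParseLoopA (fuel : Nat) (i cont numToRemove numFields : Int)
    (rt : List String) (acc : List String) : List String :=
  match fuel with
  | 0 => acc
  | fuel + 1 =>
    if i < (rt.length : Int) then
      if cont = 0 then
        pvParseLoopA fuel (i + numToRemove + 1) numFields numToRemove numFields rt acc
      else
        pvParseLoopA fuel (i + 1) (cont - 1) numToRemove numFields rt
          (acc ++ [PySem.List.pyGetD rt i ""])
    else acc

def parse_table (rank_table : List String) (name_tab : List String) (num_of_categories : Int) :
    Option (List String × List String) :=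
  let rt := rank_table.map PySem.Str.lstrip
  let rt := pvExpandA rt
  match PySem.List.index? rt "2016" with
  | none => none
  | some idx =>
    let diff : Int := (idx : Int) - 1
    let numFields : Int := num_of_categories * 3 + 1
    let numToRemove : Int := diff - numFields
    if numFields < diff then
      let tableParsed := pvParseLoopA rt.length 0 numFields numToRemove numFields rt []
      let numHeader : Int := num_of_categories * 4 + 1
      let nameTab := (PySem.List.pyRange numHeader (name_tab.length : Int) 1).foldl
        (fun acc _ => acc.dropLast) name_tab
      some (tableParsed, nameTab)
    else some (rt, name_tab)

-- ===== PORT B =====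
-- B's single expansion pass (append s, and '\' after each 'undefined').
def pvExpandB (rt : List String) : List String :=
  rt.foldl (fun acc s => if s = "undefined" then acc ++ [s, "\\"] else acc ++ [s]) []

def parse_table_alt (rank_table : List String) (name_tab : List String) (num_of_categories : Int) :
    Option (List String × List String) :=
  let rt := rank_table.map PySem.Str.lstrip
  let rt := pvExpandB rt
  match PySem.List.index? rt "2016" with
  | none => none
  | some idx =>
    let diff : Int := (idx : Int) - 1
    let numFields : Int := num_of_categories * 3 + 1
    if numFields < diff then
      let period : Int := diff + 1
      let parsed := (PySem.List.pyRange 0 (rt.length : Int) period).foldl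
        (fun acc start => acc ++ PySem.List.slice rt (some start) (some (start + numFields))) []
      let nameTab := PySem.List.slice name_tab none (some (num_of_categories * 4 + 1))
      some (parsed, nameTab)
    else some (rt, name_tab)

-- ===== PRECONDITION & SPEC =====
-- Pre_ excludes exactly the inputs on which A raises IndexError: with num_of_categories < 0 and
-- '2016' present after stripping, A's header loop pops more elements than name_tab has.
def Pre_parse_table (rank_table : List String) (name_tab : List String) (num_of_categories : Int) : Prop :=
  0 ≤ num_of_categories ∨ "2016" ∉ rank_table.map PySem.Str.lstrip
instance (rank_table : List String) (name_tab : List String) (num_of_categories : Int) : Decidable (Pre_parse_table rank_table name_tab num_of_categories) := by unfold Pre_parse_table; infer_instance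
def pvWitness_parse_table : List String × List String × Int := ((["a", " b", "2016", "c"], ["h1", "h2"], 0) : List String × List String × Int)

def Spec_parse_table (rank_table : List String) (name_tab : List String) (num_of_categories : Int) (out : Option (List String × List String)) : Prop := out = parse_table_alt rank_table name_tab num_of_categories
instance (rank_table : List String) (name_tab : List String) (num_of_categories : Int) (out : Option (List String × List String)) : Decidable (Spec_parse_table rank_table name_tab num_of_categories out) := by unfold Spec_parse_table; infer_instance

-- ===== CLAIM (what is proved, stated in full; the proofs are below) =====
def Claim_equal_parse_table : Prop := ∀ (rank_table : List String) (name_tab : List String) (num_of_categories : Int), Dom_parse_table rank_table name_tab num_of_categories → Pre_parse_table rank_table name_tab num_of_categories → Spec_parse_table rank_table name_tab num_of_categories (parse_table rank_table name_tab num_of_categories)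

-- ===== LEMMAS AND PROOFS =====

theorem pvExpandB_go (l : List String) (acc : List String) :
    l.foldl (fun acc s => if s = "undefined" then acc ++ [s, "\\"] else acc ++ [s]) acc
      = acc ++ pvExpandA l := by
  induction l generalizing acc with
  | nil => simp [pvExpandA]
  | cons s rest ih =>
    simp only [List.foldl_cons, pvExpandA]
    by_cases h : s = "undefined" <;> simp [h, ih]

theorem pvExpand_eq (l : List String) : pvExpandB l = pvExpandA l := by
  simpa using pvExpandB_go l []

theorem pvMem_expandA (l : List String) (x : String) (hx : x ≠ "\\") :
    x ∈ pvExpandA l ↔ x ∈ l := by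
  induction l with
  | nil => simp [pvExpandA]
  | cons s rest ih =>
    simp only [pvExpandA]
    by_cases h : s = "undefined" <;> simp [h, ih, hx]

theorem pvRange_pos_nil {a b s : Int} (hs : 0 < s) (h : b ≤ a) :
    PySem.List.pyRange a b s = [] := by
  rw [PySem.List.pyRange_of_pos _ _ hs, if_neg (not_lt.2 h)]
  simp

theorem pvRange_pos_cons {a b s : Int} (hs : 0 < s) (h : a < b) :
    PySem.List.pyRange a b s = a :: PySem.List.pyRange (a + s) b s := by
  rw [PySem.List.pyRange_of_pos _ _ hs, PySem.List.pyRange_of_pos _ _ hs, if_pos h]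
  have hx : (0:Int) ≤ b - a - 1 := by omega
  have hdiv : (b - a + s - 1) / s = (b - a - 1) / s + 1 := by
    have h1 := Int.add_mul_ediv_right (b - a - 1) 1 (by omega : s ≠ 0)
    have h2 : b - a + s - 1 = b - a - 1 + 1 * s := by ring
    rw [h2, h1]
  have hnn : 0 ≤ (b - a - 1) / s := Int.ediv_nonneg hx (le_of_lt hs)
  by_cases h2 : a + s < b
  · rw [if_pos h2]
    have e2 : b - (a + s) + s - 1 = b - a - 1 := by ring
    rw [e2, hdiv]
    have : ((b - a - 1) / s + 1).toNat = ((b - a - 1) / s).toNat + 1 := by omega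
    rw [this, List.range_succ_eq_map]
    simp only [List.map_cons, List.map_map, List.cons.injEq]
    refine ⟨by ring, List.map_congr_left (fun k _ => ?_)⟩
    simp only [Function.comp, Nat.succ_eq_add_one]
    push_cast
    ring
  · rw [if_neg h2]
    have hlt : b - a - 1 < s := by omega
    have : (b - a - 1) / s = 0 := Int.ediv_eq_zero_of_lt hx hlt
    rw [hdiv, this]
    simp

-- Within one block: with cont = c > 0 fields still to take, the loop appends exactly
-- rt[i : i+c] and (if the table is not exhausted) continues in state cont = 0 at i + c.
theorem pvInner (rt : List String) (ntr nf : Int) (c : Nat) :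
    ∀ (fuel : Nat) (i : Int) (acc : List String), 0 ≤ i →
      ((rt.length : Int) - i) ≤ (fuel : Int) →
      pvParseLoopA fuel i (c : Int) ntr nf rt acc =
        (if (i + c : Int) < (rt.length : Int) then
          pvParseLoopA (fuel - c) (i + c) 0 ntr nf rt
            (acc ++ (rt.drop i.toNat).take c)
        else acc ++ (rt.drop i.toNat).take c) := by
  induction c with
  | zero =>
    intro fuel i acc _ _
    simp only [Nat.cast_zero, add_zero, List.take_zero, List.append_nil, Nat.sub_zero]
    split
    · rfl
    · rename_i h
      match fuel with
      | 0 => rfl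
      | fuel + 1 => simp [pvParseLoopA, if_neg h]
  | succ c ih =>
    intro fuel i acc hi hfuel
    by_cases hlen : i < (rt.length : Int)
    · match fuel with
      | 0 => exfalso; omega
      | fuel + 1 =>
        have hc : ((c : Int) + 1) ≠ 0 := by omega
        rw [pvParseLoopA, if_pos hlen]
        have : (((c + 1 : Nat) : Int)) = (c : Int) + 1 := by push_cast; ring
        rw [this, if_neg (by omega : ¬ ((c : Int) + 1 = 0))]
        have hstep : (c : Int) + 1 - 1 = (c : Int) := by ring
        rw [hstep]
        have := ih fuel (i + 1) (acc ++ [PySem.List.pyGetD rt i ""]) (by omega) (by omega)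
        rw [this]
        have hi' : i.toNat < rt.length := by omega
        have hget : PySem.List.pyGetD rt i "" = rt[i.toNat]'hi' :=
          PySem.List.pyGetD_eq_getElem rt "" hi (by omega)
        have htake : (rt.drop i.toNat).take (c + 1)
            = rt[i.toNat]'hi' :: (rt.drop (i + 1).toNat).take c := by
          have : (i + 1).toNat = i.toNat + 1 := by omega
          rw [this, List.drop_eq_getElem_cons hi']
          rfl
        have hidx : i + 1 + (c : Int) = i + ((c + 1 : Nat) : Int) := by push_cast; ring
        rw [hidx, htake, hget]
        rw [show fuel + 1 - (c + 1) = fuel - c from by omega]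
        simp only [List.append_assoc, List.singleton_append]
        push_cast
        rfl
    · -- table exhausted: loop returns acc; the slice from i is empty
      have htake : (rt.drop i.toNat).take (c + 1) = [] := by
        have : rt.length ≤ i.toNat := by omega
        simp [List.drop_eq_nil_of_le this]
      have hif : ¬ (i + ((c + 1 : Nat) : Int) < (rt.length : Int)) := by push_cast; omega
      rw [if_neg hif, htake, List.append_nil]
      match fuel with
      | 0 => rfl
      | fuel + 1 => rw [pvParseLoopA, if_neg hlen]

-- Whole loop from a block start = B's fold of per-block slices over range(i, len, period).
theorem pvMain (rt : List String) (ntr nf : Int) (hntr : 1 ≤ ntr) (hnf : 1 ≤ nf) :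
    ∀ (fuel : Nat) (i : Int) (acc : List String), 0 ≤ i →
      ((rt.length : Int) - i) ≤ (fuel : Int) →
      pvParseLoopA fuel i nf ntr nf rt acc =
        (PySem.List.pyRange i (rt.length : Int) (nf + ntr + 1)).foldl
          (fun acc start => acc ++ PySem.List.slice rt (some start) (some (start + nf))) acc := by
  intro fuel
  induction fuel using Nat.strong_induction_on with
  | _ fuel IH =>
    intro i acc hi hfuel
    have hper : (0:Int) < nf + ntr + 1 := by omega
    by_cases hlen : i < (rt.length : Int)
    · have hslice : PySem.List.slice rt (some i) (some (i + nf))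
          = (rt.drop i.toNat).take nf.toNat := by
        rw [PySem.List.slice_toNat rt hi (by omega)]
        congr 1
        omega
      have hnfc : ((nf.toNat : Int)) = nf := by omega
      have hin := pvInner rt ntr nf nf.toNat fuel i acc hi hfuel
      rw [hnfc] at hin
      rw [hin, pvRange_pos_cons hper hlen, List.foldl_cons, hslice]
      by_cases h2 : i + nf < (rt.length : Int)
      · rw [if_pos h2]
        obtain ⟨f, hf⟩ : ∃ f, fuel - nf.toNat = f + 1 := ⟨fuel - nf.toNat - 1, by omega⟩
        have hflt : f < fuel := by omega
        rw [hf, pvParseLoopA, if_pos h2, if_pos rfl]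
        have := IH f hflt (i + (nf.toNat : Int) + ntr + 1)
          (acc ++ (rt.drop i.toNat).take nf.toNat) (by omega) (by omega)
        rw [hnfc] at this
        rw [show i + (nf + ntr + 1) = i + nf + ntr + 1 from by ring]
        rw [this]
      · rw [if_neg h2]
        have : (rt.length : Int) ≤ i + (nf + ntr + 1) := by omega
        rw [pvRange_pos_nil hper this]
        rfl
    · have h0 : (rt.length : Int) ≤ i := by omega
      rw [pvRange_pos_nil hper h0]
      match fuel with
      | 0 => rfl
      | fuel + 1 => rw [pvParseLoopA, if_neg hlen]; rfl

theorem pvFoldl_dropLast {α : Type} (l : List α) :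
    ∀ (m : Nat) (nt : List α), (List.range m).foldl (fun acc _ => acc.dropLast) nt
      = nt.take (nt.length - m)
  | 0, nt => by simp
  | m + 1, nt => by
    rw [List.range_succ, List.foldl_append]
    rw [pvFoldl_dropLast l m nt]
    rcases Nat.lt_or_ge m nt.length with h | h
    · simp only [List.foldl_cons, List.foldl_nil]
      rw [List.dropLast_eq_take, List.take_take]
      congr 1
      simp only [List.length_take]
      omega
    · simp [Nat.sub_eq_zero_of_le h, Nat.sub_eq_zero_of_le (Nat.le_succ_of_le h)]

-- the pop loop over range(num_header, len) equals name_tab[:num_header] for num_header ≥ 0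
theorem pvPops (nt : List String) (k : Int) (hk : 0 ≤ k) :
    (PySem.List.pyRange k (nt.length : Int) 1).foldl (fun acc _ => acc.dropLast) nt
      = PySem.List.slice nt none (some k) := by
  rw [PySem.List.slice_to nt hk, PySem.List.pyRange_one, List.foldl_map]
  rw [pvFoldl_dropLast nt ((nt.length : Int) - k).toNat nt]
  rcases Nat.lt_or_ge k.toNat nt.length with h | h
  · congr 1
    omega
  · rw [List.take_of_length_le (by omega), List.take_of_length_le (by omega)]

-- ===== VERDICT (by name: the statement is the Claim_ definition above) =====
theorem parse_table_spec : Claim_equal_parse_table := by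
  intro rank_table name_tab c _ hpre
  unfold Spec_parse_table parse_table parse_table_alt
  simp only [pvExpand_eq]
  set l := (rank_table.map PySem.Str.lstrip) with hl
  rcases hidx : PySem.List.index? (pvExpandA l) "2016" with _ | idx
  · simp [hidx]
  · simp only [hidx]
    have hmem : "2016" ∈ pvExpandA l := by
      have := (PySem.List.index?_isSome_iff (pvExpandA l) "2016").1
      exact this (by rw [hidx]; rfl)
    have hc : 0 ≤ c := by
      rcases hpre with h | h
      · exact h
      · exact absurd ((pvMem_expandA l "2016" (by decide)).1 hmem) h
    by_cases hbr : c * 3 + 1 < (idx : Int) - 1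
    · rw [if_pos hbr, if_pos hbr]
      have hnf : (1:Int) ≤ c * 3 + 1 := by omega
      have hntr : (1:Int) ≤ (idx : Int) - 1 - (c * 3 + 1) := by omega
      have hmain := pvMain (pvExpandA l) ((idx : Int) - 1 - (c * 3 + 1)) (c * 3 + 1)
        hntr hnf (pvExpandA l).length 0 [] (by omega) (by omega)
      have hper : c * 3 + 1 + ((idx : Int) - 1 - (c * 3 + 1)) + 1 = (idx : Int) - 1 + 1 := by ring
      rw [hper] at hmain
      rw [hmain, pvPops name_tab (c * 4 + 1) (by omega)]
    · rw [if_neg hbr, if_neg hbr]
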